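-- pv_equiv track=rewrite | github.com/ivknv/old-stuff | web-noter/Diff/__init__.py | findAllDifferencesLine
-- ===== SOURCE A (Python) =====
-- def findAllDifferencesLine(s1, s2):
-- 	differences=[]
-- 	i=0
-- 	s1=s1.split("\n")
-- 	s2=s2.split("\n")
-- 	while i<max(len(s1), len(s2)):
-- 		try:
-- 			if s1[i]!=s2[i]:
-- 				differences.append((i, s1[i], s2[i]))
-- 		except IndexError:
-- 			m=s1 if len(s1)>len(s2) else s2
-- 			differences.append((i, m[i] if m == s1 else "", m[i] if m == s2 else ""))
-- 		i+=1
-- 	return differences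
-- ===== SOURCE B (Python) =====
-- def findAllDifferencesLine(s1, s2):
--     l1 = s1.split("\n")
--     l2 = s2.split("\n")
--     common = min(len(l1), len(l2))
--     res = [(i, l1[i], l2[i]) for i in range(common) if l1[i] != l2[i]]
--     res += [(i, l1[i], "") for i in range(common, len(l1))]
--     res += [(i, "", l2[i]) for i in range(common, len(l2))]
--     return res
-- ===== Notes on version B (the rewrite author's own statement) =====
-- stated objective: faster
-- what changed: Replaced the try/except-driven while loop over max(len) (whose except branch re-compares whole lists m==s1/m==s2 on every extra line) by three explicit range loops: common prefix compared pairwise, then each tail appended unconditionally.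
import Mathlib
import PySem

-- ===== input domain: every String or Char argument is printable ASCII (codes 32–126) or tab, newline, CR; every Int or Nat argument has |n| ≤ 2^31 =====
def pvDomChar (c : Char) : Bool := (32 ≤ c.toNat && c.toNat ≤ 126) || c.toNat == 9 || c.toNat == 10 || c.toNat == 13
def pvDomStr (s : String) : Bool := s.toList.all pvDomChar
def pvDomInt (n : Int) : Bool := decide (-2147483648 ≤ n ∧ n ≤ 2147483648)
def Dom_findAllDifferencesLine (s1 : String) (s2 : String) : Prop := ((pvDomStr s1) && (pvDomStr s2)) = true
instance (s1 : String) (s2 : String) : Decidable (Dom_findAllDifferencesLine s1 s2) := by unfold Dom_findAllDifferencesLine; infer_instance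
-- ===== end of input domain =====

-- B replaces A's try/except while-loop (whose except branch re-compares the whole lists m==s1/m==s2
-- on every extra trailing line) by three explicit range loops over common prefix and the two tails.

-- ===== PORT A =====
-- one loop iteration of A's while body (the try/except: the `_, _` case is the IndexError branch)
def pvBodyA (l1 l2 : List String) (i : Nat) : List (Int × String × String) :=
  match PySem.List.pyGet? l1 (i : Int), PySem.List.pyGet? l2 (i : Int) with
  | some a, some b => if a ≠ b then [((i : Int), a, b)] else []
  | _, _ =>
      let m := if l1.length > l2.length then l1 else l2
      -- m[i] here is provably in range (i < max = len m), so Python never raises; getD is exact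
      [((i : Int),
        if m = l1 then (PySem.List.pyGet? m (i : Int)).getD "" else "",
        if m = l2 then (PySem.List.pyGet? m (i : Int)).getD "" else "")]

-- the while loop: i counts up to n = max(len l1, len l2)
def pvLoopA (l1 l2 : List String) (n : Nat) (i : Nat) : List (Int × String × String) :=
  if _h : i < n then pvBodyA l1 l2 i ++ pvLoopA l1 l2 n (i + 1) else []
termination_by n - i

def findAllDifferencesLine (s1 : String) (s2 : String) : List (Int × String × String) :=
  let l1 := (PySem.Str.split? s1 "\n").getD []
  let l2 := (PySem.Str.split? s2 "\n").getD []
  pvLoopA l1 l2 (max l1.length l2.length) 0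

-- ===== PORT B =====
def findAllDifferencesLine_alt (s1 : String) (s2 : String) : List (Int × String × String) :=
  let l1 := (PySem.Str.split? s1 "\n").getD []
  let l2 := (PySem.Str.split? s2 "\n").getD []
  let common := min l1.length l2.length
  (((List.range common).filter (fun i => l1.getD i "" ≠ l2.getD i "")).map
      (fun i => (Int.ofNat i, l1.getD i "", l2.getD i "")))
    ++ ((List.range' common (l1.length - common)).map (fun i => (Int.ofNat i, l1.getD i "", "")))
    ++ ((List.range' common (l2.length - common)).map (fun i => (Int.ofNat i, "", l2.getD i "")))

-- ===== PRECONDITION & SPEC =====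
def Spec_findAllDifferencesLine (s1 : String) (s2 : String) (out : List (Int × String × String)) : Prop := out = findAllDifferencesLine_alt s1 s2
instance (s1 : String) (s2 : String) (out : List (Int × String × String)) : Decidable (Spec_findAllDifferencesLine s1 s2 out) := by unfold Spec_findAllDifferencesLine; infer_instance

-- ===== CLAIM (what is proved, stated in full; the proofs are below) =====
def Claim_equal_findAllDifferencesLine : Prop := ∀ (s1 : String) (s2 : String), Dom_findAllDifferencesLine s1 s2 → Spec_findAllDifferencesLine s1 s2 (findAllDifferencesLine s1 s2)

-- ===== LEMMAS AND PROOFS =====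

-- the loop is the flatMap of its body over the remaining indices
theorem pvLoopA_eq_flatMap (l1 l2 : List String) (n i : Nat) :
    pvLoopA l1 l2 n i = (List.range' i (n - i)).flatMap (pvBodyA l1 l2) := by
  generalize hk : n - i = k
  induction k generalizing i with
  | zero =>
      rw [pvLoopA, dif_neg (by omega)]
      simp
  | succ k ih =>
      have hi : i < n := by omega
      rw [pvLoopA, dif_pos hi, ih (i + 1) (by omega), List.range'_succ, List.flatMap_cons]

theorem filter_map_eq_flatMap {α β : Type} (l : List α) (p : α → Bool) (f : α → β) :
    (l.filter p).map f = l.flatMap (fun x => if p x then [f x] else []) := by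
  induction l with
  | nil => rfl
  | cons x xs ih => by_cases h : p x <;> simp [h, ih]

theorem map_eq_flatMap {α β : Type} (l : List α) (f : α → β) :
    l.map f = l.flatMap (fun x => [f x]) := by
  induction l with
  | nil => rfl
  | cons x xs ih => simp [ih]

theorem flatMap_congr_mem {α β : Type} (l : List α) (f g : α → List β)
    (h : ∀ x ∈ l, f x = g x) : l.flatMap f = l.flatMap g := by
  induction l with
  | nil => rfl
  | cons x xs ih =>
      simp only [List.flatMap_cons]
      rw [h x (by simp), ih (fun y hy => h y (by simp [hy]))]

-- body in the common prefix
theorem pvBodyA_lt (l1 l2 : List String) (i : Nat) (h1 : i < l1.length) (h2 : i < l2.length) :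
    pvBodyA l1 l2 i =
      if l1.getD i "" ≠ l2.getD i "" then [(Int.ofNat i, l1.getD i "", l2.getD i "")] else [] := by
  simp only [pvBodyA, PySem.List.pyGet?_natCast, List.getElem?_eq_getElem h1,
    List.getElem?_eq_getElem h2, List.getD_eq_getElem?_getD, Option.getD_some]
  rfl

-- body in l1's tail
theorem pvBodyA_tail1 (l1 l2 : List String) (i : Nat) (h2 : l2.length ≤ i) (h1 : i < l1.length) :
    pvBodyA l1 l2 i = [(Int.ofNat i, l1.getD i "", "")] := by
  have hlen : l2.length < l1.length := by omega
  have hne : l1 ≠ l2 := by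
    intro e; rw [e] at hlen; omega
  simp only [pvBodyA, PySem.List.pyGet?_natCast, List.getElem?_eq_getElem h1,
    List.getElem?_eq_none (by omega : l2.length ≤ i)]
  simp [gt_iff_lt, hlen, hne, List.getD_eq_getElem?_getD, List.getElem?_eq_getElem h1]

-- body in l2's tail
theorem pvBodyA_tail2 (l1 l2 : List String) (i : Nat) (h1 : l1.length ≤ i) (h2 : i < l2.length) :
    pvBodyA l1 l2 i = [(Int.ofNat i, "", l2.getD i "")] := by
  have hlen : l1.length < l2.length := by omega
  have hne : l2 ≠ l1 := by
    intro e; rw [e] at hlen; omega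
  simp only [pvBodyA, PySem.List.pyGet?_natCast, List.getElem?_eq_getElem h2,
    List.getElem?_eq_none (by omega : l1.length ≤ i)]
  simp [gt_iff_lt, Nat.not_lt.mpr (Nat.le_of_lt hlen), hne,
    List.getD_eq_getElem?_getD, List.getElem?_eq_getElem h2]

theorem main_lists (l1 l2 : List String) :
    pvLoopA l1 l2 (max l1.length l2.length) 0 =
      (((List.range (min l1.length l2.length)).filter (fun i => l1.getD i "" ≠ l2.getD i "")).map
          (fun i => (Int.ofNat i, l1.getD i "", l2.getD i "")))
        ++ ((List.range' (min l1.length l2.length) (l1.length - min l1.length l2.length)).map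
              (fun i => (Int.ofNat i, l1.getD i "", "")))
        ++ ((List.range' (min l1.length l2.length) (l2.length - min l1.length l2.length)).map
              (fun i => (Int.ofNat i, "", l2.getD i ""))) := by
  rw [pvLoopA_eq_flatMap, Nat.sub_zero]
  set c := min l1.length l2.length with hc
  set n := max l1.length l2.length with hn
  have hsplit : List.range' 0 n = List.range' 0 c ++ List.range' c (n - c) := by
    have := @List.range'_append 0 c (n - c) 1
    simp only [Nat.zero_add, Nat.one_mul] at this
    rw [this, show c + (n - c) = n from by omega]
  rw [hsplit, List.flatMap_append]
  have hhead : (List.range' 0 c).flatMap (pvBodyA l1 l2) =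
      (((List.range c).filter (fun i => l1.getD i "" ≠ l2.getD i "")).map
        (fun i => (Int.ofNat i, l1.getD i "", l2.getD i ""))) := by
    rw [filter_map_eq_flatMap, List.range_eq_range']
    apply flatMap_congr_mem
    intro i hi
    have hic : i < c := by
      have := List.mem_range'_1.mp hi; omega
    rw [pvBodyA_lt l1 l2 i (by omega) (by omega)]
    simp
  rw [hhead, List.append_assoc]
  congr 1
  rcases Nat.lt_or_ge l2.length l1.length with h | h
  · have h20 : l2.length - c = 0 := by omega
    rw [h20]
    simp only [List.range'_zero, List.map_nil, List.append_nil]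
    rw [show l1.length - c = n - c from by omega, map_eq_flatMap]
    apply flatMap_congr_mem
    intro i hi
    have := List.mem_range'_1.mp hi
    exact pvBodyA_tail1 l1 l2 i (by omega) (by omega)
  · have h10 : l1.length - c = 0 := by omega
    rw [h10]
    simp only [List.range'_zero, List.map_nil, List.nil_append]
    rw [show l2.length - c = n - c from by omega, map_eq_flatMap]
    apply flatMap_congr_mem
    intro i hi
    have := List.mem_range'_1.mp hi
    exact pvBodyA_tail2 l1 l2 i (by omega) (by omega)

-- ===== VERDICT (by name: the statement is the Claim_ definition above) =====
theorem findAllDifferencesLine_spec : Claim_equal_findAllDifferencesLine := by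
  intro s1 s2 _
  show findAllDifferencesLine s1 s2 = findAllDifferencesLine_alt s1 s2
  unfold findAllDifferencesLine findAllDifferencesLine_alt
  exact main_lists _ _
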